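-- pv_equiv track=rewrite | github.com/JeongGod/Algo-study | hyeonjun/16week/p77885.py | solution
-- ===== SOURCE A (Python) =====
-- from math import floor
--
-- def solution(numbers):
--     answer = []
--     for number in numbers:
--         for idx, elm in enumerate(bin(number)[::-1]):
--             if elm == '0' or elm == 'b':
--                 target = floor(2**(idx-1)) ^ number | 2**idx
--                 answer.append(target)
--                 break
--
--     return answer
-- ===== SOURCE B (Python) =====
-- def solution(numbers):
--     # closed-form lowest-zero-bit of the magnitude instead of scanning bin()'s characters
--     answer = []
--     for number in numbers:
--         m = abs(number)
--         low = ~m & (m + 1)          # single bit at the lowest zero bit of m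
--         answer.append(((low >> 1) ^ number) | low)
--     return answer
-- ===== Notes on version B (the rewrite author's own statement) =====
-- stated objective: faster
-- what changed: Replaces the per-number construction, reversal and character scan of bin(number) with the O(1)-word bit trick low = ~m & (m+1) that isolates the lowest zero bit of the magnitude directly.
import Mathlib
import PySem

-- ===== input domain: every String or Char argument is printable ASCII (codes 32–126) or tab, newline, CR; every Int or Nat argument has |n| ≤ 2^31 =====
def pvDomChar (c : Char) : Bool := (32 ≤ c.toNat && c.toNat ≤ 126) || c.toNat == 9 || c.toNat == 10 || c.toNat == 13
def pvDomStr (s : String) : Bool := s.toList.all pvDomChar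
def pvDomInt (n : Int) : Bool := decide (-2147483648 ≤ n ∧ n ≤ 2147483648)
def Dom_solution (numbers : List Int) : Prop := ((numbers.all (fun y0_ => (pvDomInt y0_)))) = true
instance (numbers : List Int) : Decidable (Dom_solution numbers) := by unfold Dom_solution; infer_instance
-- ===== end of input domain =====

-- B replaces A's build/reverse/scan of bin(number)'s characters by the closed-form
-- lowest-zero-bit trick low = ~m & (m+1); constant-factor faster, no string work.

-- ===== PORT A =====
-- port of Python's bin() digits: binary digits of m, most significant first
-- ("" for m = 0; pyBin below adds the '0' digit of bin(0) = "0b0" as a special case; exact)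
def binDigits (m : Nat) : List Char :=
  if m = 0 then []
  else binDigits (m / 2) ++ [if m % 2 = 1 then '1' else '0']
decreasing_by exact Nat.div_lt_self (by omega) (by omega)

-- bin(n): optional '-', then "0b", then the digits of abs(n)
def pyBin (n : Int) : List Char :=
  (if n < 0 then ['-'] else []) ++ '0' :: 'b' :: (if n.natAbs = 0 then ['0'] else binDigits n.natAbs)

-- floor(2**(idx-1)): exact for idx : Nat (idx = 0 gives floor(0.5) = 0, otherwise 2^(idx-1))
def floorPow (idx : Nat) : Int := if idx = 0 then 0 else 2 ^ (idx - 1)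

-- the inner `for idx, elm in enumerate(...)` loop with its break
def innerScan (n : Int) (cs : List Char) (idx : Nat) : List Int :=
  match cs with
  | [] => []
  | c :: rest =>
    if c = '0' ∨ c = 'b' then [Int.lor (Int.xor (floorPow idx) n) (2 ^ idx)]
    else innerScan n rest (idx + 1)

-- s[::-1] on a string is reversal of its characters (exact)
def solution (numbers : List Int) : List Int :=
  numbers.foldl (fun acc number => acc ++ innerScan number (pyBin number).reverse 0) []

-- ===== PORT B =====
def solution_alt (numbers : List Int) : List Int :=
  numbers.foldl (fun acc number =>
    let m : Int := |number|
    let low : Int := Int.land (Int.lnot m) (m + 1)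
    acc ++ [Int.lor (Int.xor (Int.shiftRight low 1) number) low]) []

-- ===== PRECONDITION & SPEC =====
def Spec_solution (numbers : List Int) (out : List Int) : Prop := out = solution_alt numbers
instance (numbers : List Int) (out : List Int) : Decidable (Spec_solution numbers out) := by unfold Spec_solution; infer_instance

-- ===== CLAIM (what is proved, stated in full; the proofs are below) =====
def Claim_equal_solution : Prop := ∀ (numbers : List Int), Dom_solution numbers → Spec_solution numbers (solution numbers)

-- ===== LEMMAS AND PROOFS =====

-- index of the lowest zero bit of m (= bit length of m when m is all ones)
def lowZero (m : Nat) : Nat :=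
  if h : m % 2 = 1 then lowZero (m / 2) + 1 else 0
decreasing_by exact Nat.div_lt_self (by omega) (by omega)

theorem ldiff_succ (m : Nat) : Nat.ldiff (m + 1) m = 2 ^ lowZero m := by
  induction m using Nat.strong_induction_on with
  | _ m ih =>
    rcases Nat.even_or_odd m with he | ho
    · -- m even: lowest zero bit is 0, ldiff (m+1) m = 1
      have hm2 : m % 2 = 0 := Nat.even_iff.mp he
      rw [lowZero, dif_neg (by omega : ¬ m % 2 = 1)]
      apply Nat.eq_of_testBit_eq
      intro i
      rw [Nat.testBit_ldiff]
      cases i with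
      | zero =>
        rw [Nat.testBit_zero, Nat.testBit_zero, Nat.testBit_two_pow]
        simp; omega
      | succ j =>
        have h1 : (m + 1) / 2 = m / 2 := by omega
        rw [Nat.testBit_add_one, Nat.testBit_add_one, h1, Nat.testBit_two_pow]
        simp
    · -- m odd: recurse on m / 2
      have hm2 : m % 2 = 1 := Nat.odd_iff.mp ho
      have hdiv2 : m / 2 < m := Nat.div_lt_self (by omega) (by omega)
      rw [lowZero, dif_pos hm2]
      have ihm := ih (m / 2) hdiv2
      apply Nat.eq_of_testBit_eq
      intro i
      rw [Nat.testBit_ldiff]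
      cases i with
      | zero =>
        rw [Nat.testBit_zero, Nat.testBit_zero, Nat.testBit_zero, Nat.pow_succ]
        have : 2 ^ lowZero (m / 2) * 2 % 2 = 0 := by omega
        simp [this]; omega
      | succ j =>
        have h1 : (m + 1) / 2 = m / 2 + 1 := by omega
        rw [Nat.testBit_add_one, Nat.testBit_add_one, h1, ← Nat.testBit_ldiff, ihm,
          Nat.testBit_two_pow, Nat.testBit_two_pow]
        simp

theorem low_eq (a : Nat) :
    Int.land (Int.lnot (Int.ofNat a)) (Int.ofNat a + 1) = (2 : Int) ^ lowZero a := by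
  have h1 : Int.lnot (Int.ofNat a) = Int.negSucc a := rfl
  have h2 : Int.ofNat a + 1 = Int.ofNat (a + 1) := rfl
  rw [h1, h2]
  show Int.ofNat (Nat.ldiff (a + 1) a) = (2 : Int) ^ lowZero a
  rw [ldiff_succ]
  rfl

theorem shiftRight_two_pow (k : Nat) : Int.shiftRight ((2 : Int) ^ k) 1 = floorPow k := by
  have h : (2 : Int) ^ k = Int.ofNat (2 ^ k) := by rfl
  rw [h]
  show Int.ofNat (2 ^ k >>> 1) = floorPow k
  cases k with
  | zero => rfl
  | succ j =>
    simp [floorPow, Nat.shiftRight_succ, Nat.pow_succ]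

theorem scan_main (m : Nat) : ∀ (n : Int) (idx : Nat) (tail : List Char),
    innerScan n ((binDigits m).reverse ++ 'b' :: tail) idx =
      [Int.lor (Int.xor (floorPow (idx + lowZero m)) n) (2 ^ (idx + lowZero m))] := by
  induction m using Nat.strong_induction_on with
  | _ m ih =>
    intro n idx tail
    by_cases hm : m = 0
    · subst hm
      rw [binDigits, if_pos rfl, lowZero, dif_neg (by omega : ¬ (0 : Nat) % 2 = 1)]
      simp [innerScan]
    · rw [binDigits, if_neg hm]
      rw [List.reverse_append, List.reverse_singleton, List.singleton_append, List.cons_append]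
      by_cases hpar : m % 2 = 1
      · rw [lowZero, dif_pos hpar]
        have : innerScan n (((if m % 2 = 1 then '1' else '0') ::
            ((binDigits (m / 2)).reverse ++ 'b' :: tail))) idx =
            innerScan n ((binDigits (m / 2)).reverse ++ 'b' :: tail) (idx + 1) := by
          simp [innerScan, hpar]
        rw [if_pos hpar] at this ⊢
        rw [this, ih (m / 2) (Nat.div_lt_self (by omega) (by omega)) n (idx + 1) tail]
        have harith : idx + 1 + lowZero (m / 2) = idx + (lowZero (m / 2) + 1) := by omega
        rw [harith]
      · rw [lowZero, dif_neg hpar]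
        have hpar0 : m % 2 = 0 := by omega
        simp [innerScan, hpar0]

theorem elem_eq (n : Int) :
    innerScan n (pyBin n).reverse 0 =
      [Int.lor (Int.xor (Int.shiftRight (Int.land (Int.lnot |n|) (|n| + 1)) 1) n)
        (Int.land (Int.lnot |n|) (|n| + 1))] := by
  have habs : |n| = Int.ofNat n.natAbs := Int.abs_eq_natAbs n
  rw [habs, low_eq, shiftRight_two_pow]
  by_cases h0 : n.natAbs = 0
  · have hn : n = 0 := Int.natAbs_eq_zero.mp h0
    subst hn
    have hz : lowZero 0 = 0 := by rw [lowZero, dif_neg (by omega : ¬ (0 : Nat) % 2 = 1)]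
    norm_num [pyBin, innerScan, hz]
  · rw [pyBin, if_neg h0]
    have hsplit : ((if n < 0 then ['-'] else []) ++ '0' :: 'b' :: binDigits n.natAbs).reverse =
        (binDigits n.natAbs).reverse ++ 'b' :: ('0' :: (if n < 0 then ['-'] else []).reverse) := by
      simp
    rw [hsplit, scan_main]
    simp only [Nat.zero_add]

theorem fold_eq (numbers : List Int) : solution numbers = solution_alt numbers := by
  unfold solution solution_alt
  rw [PySem.List.foldl_append_eq_flatMap, PySem.List.foldl_append_eq_flatMap]
  simp only [List.nil_append]
  induction numbers with
  | nil => rfl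
  | cons x xs ihx =>
    rw [List.flatMap_cons, List.flatMap_cons, ihx, elem_eq]

-- ===== VERDICT (by name: the statement is the Claim_ definition above) =====
theorem solution_spec : Claim_equal_solution := by
  intro numbers _
  unfold Spec_solution
  exact fold_eq numbers
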